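-- pv_equiv track=rewrite | github.com/hzkyah/Exercises | prioritization_by_version_by_id.py | merge_boxs
-- ===== SOURCE A (Python) =====
-- import heapq
--
-- def merge_boxs(prime_box_heap, version_map, regular_box):
--     output = [] # final output result will be stored here
--     while prime_box_heap:
--         version = heapq.heappop(prime_box_heap)
--         box_ids = version_map[version]
--         box_id = box_ids.pop()
--         output.append(box_id + ' ' + version)
--     while regular_box:
--         output.append(regular_box.pop())
--     return output
-- ===== SOURCE B (Python) =====
-- def merge_boxs(prime_box_heap, version_map, regular_box):
--     # Idiomatic rewrite: one sort + flat passes instead of a maintained heap.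
--     # Like A, it empties prime_box_heap and regular_box and pops from the
--     # version_map lists (same observable side effects).
--     output = []
--     for version in sorted(prime_box_heap):
--         output.append(version_map[version].pop() + ' ' + version)
--     output.extend(reversed(regular_box))
--     prime_box_heap.clear()
--     regular_box.clear()
--     return output
-- ===== Notes on version B (the rewrite author's own statement) =====
-- stated objective: idiomatic
-- what changed: Replaces the maintained binary min-heap drained by repeated heapq.heappop with a single sorted() pass over the versions plus reversed() for the regular boxes (inputs are cleared afterwards to keep A's emptying side effect).
-- outside the precondition, e.g. on merge_boxs(['b', 'a'], {'a': ['1'], 'b': ['2']}, []): A returns ['2 b', '1 a'], B returns ['1 a', '2 b']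
import Mathlib
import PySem

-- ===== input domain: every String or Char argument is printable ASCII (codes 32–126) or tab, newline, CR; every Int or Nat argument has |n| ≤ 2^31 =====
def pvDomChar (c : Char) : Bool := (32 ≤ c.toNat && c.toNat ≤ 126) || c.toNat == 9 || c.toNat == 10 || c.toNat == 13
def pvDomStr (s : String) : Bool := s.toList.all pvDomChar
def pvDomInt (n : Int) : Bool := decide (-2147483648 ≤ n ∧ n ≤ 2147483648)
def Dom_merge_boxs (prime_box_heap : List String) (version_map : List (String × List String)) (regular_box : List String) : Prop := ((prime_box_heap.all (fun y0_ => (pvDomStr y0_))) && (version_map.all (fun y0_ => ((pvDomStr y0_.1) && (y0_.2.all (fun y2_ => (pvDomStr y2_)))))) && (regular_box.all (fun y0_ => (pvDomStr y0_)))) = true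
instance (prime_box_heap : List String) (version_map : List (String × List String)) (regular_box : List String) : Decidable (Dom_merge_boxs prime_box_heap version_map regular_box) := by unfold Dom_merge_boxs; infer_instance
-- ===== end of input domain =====

-- B replaces A's heapq drain by one sorted() pass (idiomatic, same cost); the proved
-- equivalence is about the RETURN value only — both Pythons empty prime_box_heap and
-- regular_box and pop from the version_map lists as a side effect.

-- ===== PORT A =====
-- heapq.heappop ported by hand: pop the last element, move it to the root and sift it
-- down, swapping with the smaller child while it is larger. On inputs satisfying
-- Pre_merge_boxs (a valid heap) this is exact for merge_boxs: each pop returns the root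
-- and leaves a valid heap of the remaining elements, which is all the return value
-- depends on (CPython's _siftup reaches the same popped sequence).
-- (The loops use a fuel argument, preset to a size that can never run out, purely to
--  make the recursion structural; it changes no computed value.)

-- index of the smaller child of node i (the candidate swap target)
def pvChild (l : List String) (i : Nat) : Nat :=
  if 2*i+2 < l.length ∧ l.getD (2*i+2) "" < l.getD (2*i+1) "" then 2*i+2 else 2*i+1

def pvSiftDown : Nat → List String → Nat → List String
  | 0, l, _ => l
  | fuel+1, l, i =>
    if 2*i+1 < l.length then
      if l.getD (pvChild l i) "" < l.getD i "" then
        pvSiftDown fuel ((l.set i (l.getD (pvChild l i) "")).set (pvChild l i) (l.getD i "")) (pvChild l i)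
      else l
    else l

-- heapq.heappop: none = IndexError on the empty list
def pvHeappop (l : List String) : Option (String × List String) :=
  match l.getLast? with
  | none => none
  | some last =>
    let rest := l.dropLast
    if rest.isEmpty then some (last, [])
    else some (rest.getD 0 "", pvSiftDown rest.length (rest.set 0 last) 0)

-- first while-loop of A: drain the heap, emitting "<box_id> <version>"
-- (the `out`-returning branches on a missing key / empty id list are where the
--  Python raises KeyError / IndexError — excluded by Pre_merge_boxs)
def pvDrain : Nat → List String → PySem.Dict String (List String) → List String → List String
  | 0, _, _, out => out
  | fuel+1, heap, vm, out =>
    match pvHeappop heap with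
    | none => out
    | some (version, heap') =>
      match vm.get? version with
      | none => out
      | some ids =>
        match ids.getLast? with
        | none => out
        | some boxId =>
          pvDrain fuel heap' (vm.insert version ids.dropLast) (out ++ [boxId ++ " " ++ version])

-- second while-loop of A: pop regular_box from the back
def pvRegDrain : Nat → List String → List String → List String
  | 0, _, out => out
  | fuel+1, rb, out =>
    match rb.getLast? with
    | none => out
    | some x => pvRegDrain fuel rb.dropLast (out ++ [x])

def merge_boxs (prime_box_heap : List String) (version_map : List (String × List String)) (regular_box : List String) : List String :=
  pvRegDrain regular_box.length regular_box
    (pvDrain prime_box_heap.length prime_box_heap (PySem.Dict.mk version_map) [])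

-- ===== PORT B =====
-- loop body of B's single `for version in sorted(prime_box_heap)` pass
-- (state = (version_map, output); unchanged state marks the raising inputs outside Pre_)
def pvTake (st : PySem.Dict String (List String) × List String) (version : String) :
    PySem.Dict String (List String) × List String :=
  match st.1.get? version with
  | none => st
  | some ids =>
    match ids.getLast? with
    | none => st
    | some boxId => (st.1.insert version ids.dropLast, st.2 ++ [boxId ++ " " ++ version])

def merge_boxs_alt (prime_box_heap : List String) (version_map : List (String × List String)) (regular_box : List String) : List String :=
  ((PySem.List.sorted prime_box_heap (fun x => x) false).foldl pvTake (PySem.Dict.mk version_map, [])).2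
    ++ regular_box.reverse

-- ===== PRECONDITION & SPEC =====
-- prime_box_heap satisfies the binary min-heap invariant heapq requires
-- (parent ≤ child, phrased on toList because Python's string order is the
--  lexicographic code-point order and this form is kernel-decidable)
def pvIsHeap (l : List String) : Prop :=
  ∀ j, j < l.length → 0 < j → ¬ ((l.getD j "").toList < (l.getD ((j-1)/2) "").toList)

-- Pre_ excludes (a) inputs where A raises: a popped version missing from version_map
-- (KeyError) or with too few box ids (IndexError); and (b) lists that violate the
-- min-heap invariant heapq.heappop's contract requires — there A still returns, but in
-- an accidental order determined by heappop's internal array shuffling, which no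
-- caller would specify (B uses the intended sorted order).
def Pre_merge_boxs (prime_box_heap : List String) (version_map : List (String × List String)) (regular_box : List String) : Prop :=
  pvIsHeap prime_box_heap ∧
  ∀ v ∈ prime_box_heap,
    prime_box_heap.count v ≤ ((PySem.Dict.mk version_map).getD v []).length

instance (prime_box_heap : List String) (version_map : List (String × List String)) (regular_box : List String) : Decidable (Pre_merge_boxs prime_box_heap version_map regular_box) := by
  unfold Pre_merge_boxs pvIsHeap; infer_instance

def pvWitness_merge_boxs : List String × (List (String × List String)) × List String :=
  (["a", "b"], [("a", ["1"]), ("b", ["2"])], ["x"])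

def Spec_merge_boxs (prime_box_heap : List String) (version_map : List (String × List String)) (regular_box : List String) (out : List String) : Prop := out = merge_boxs_alt prime_box_heap version_map regular_box
instance (prime_box_heap : List String) (version_map : List (String × List String)) (regular_box : List String) (out : List String) : Decidable (Spec_merge_boxs prime_box_heap version_map regular_box out) := by unfold Spec_merge_boxs; infer_instance

-- ===== CLAIM (what is proved, stated in full; the proofs are below) =====
def Claim_equal_merge_boxs : Prop := ∀ (prime_box_heap : List String) (version_map : List (String × List String)) (regular_box : List String), Dom_merge_boxs prime_box_heap version_map regular_box → Pre_merge_boxs prime_box_heap version_map regular_box → Spec_merge_boxs prime_box_heap version_map regular_box (merge_boxs prime_box_heap version_map regular_box)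

-- ===== LEMMAS AND PROOFS =====

-- the heap invariant, restated with String ≤ (the form the ordering proofs use)
def pvHeapLe (l : List String) : Prop :=
  ∀ j, j < l.length → 0 < j → l.getD ((j-1)/2) "" ≤ l.getD j ""

theorem pvIsHeap_iff (l : List String) : pvIsHeap l ↔ pvHeapLe l := by
  unfold pvIsHeap pvHeapLe
  refine forall_congr' fun j => forall_congr' fun _ => forall_congr' fun _ => ?_
  rw [← String.lt_iff_toList_lt]
  exact not_lt

-- getD after set, spelled out
theorem pvGetD_set (l : List String) (a b : Nat) (x : String) :
    (l.set a x).getD b "" = if a = b ∧ a < l.length then x else l.getD b "" := by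
  simp [List.getD_eq_getElem?_getD, List.getElem?_set]
  split_ifs with h1 h2 h3 <;> simp_all <;> omega

theorem pvSwap_perm (l : List String) (i c : Nat) (hi : i < l.length) (hc : c < l.length) (hne : i ≠ c) :
    ((l.set i (l.getD c "")).set c (l.getD i "")).Perm l := by
  rw [List.perm_iff_count]
  intro x
  have hmemi : l[i] ∈ l := List.getElem_mem hi
  simp [List.count_set, hi, hc]
  rw [List.getElem_set_ne hne]
  have h1 : l[i] = x → 1 ≤ l.count x := fun h => List.count_pos_iff.mpr (h ▸ hmemi)
  split_ifs <;> simp_all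

-- which child pvChild picks, and why
theorem pvChild_spec (l : List String) (i : Nat) :
    (pvChild l i = 2*i+2 ∧ 2*i+2 < l.length ∧ l.getD (2*i+2) "" < l.getD (2*i+1) "")
    ∨ (pvChild l i = 2*i+1 ∧ ¬(2*i+2 < l.length ∧ l.getD (2*i+2) "" < l.getD (2*i+1) "")) := by
  unfold pvChild
  split
  · next h => exact Or.inl ⟨rfl, h⟩
  · next h => exact Or.inr ⟨rfl, h⟩

theorem pvSiftDown_perm (fuel : Nat) : ∀ (l : List String) (i : Nat), (pvSiftDown fuel l i).Perm l := by
  induction fuel with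
  | zero => intro l i; exact List.Perm.refl _
  | succ fuel ih =>
    intro l i
    rw [pvSiftDown]
    by_cases h1 : 2*i+1 < l.length
    · rw [if_pos h1]
      by_cases hswap : l.getD (pvChild l i) "" < l.getD i ""
      · rw [if_pos hswap]
        have hcl : pvChild l i < l.length ∧ i < pvChild l i := by
          rcases pvChild_spec l i with ⟨h, h2, _⟩ | ⟨h, _⟩ <;> omega
        exact (ih _ _).trans (pvSwap_perm l i (pvChild l i) (by omega) hcl.1 (by omega))
      · rw [if_neg hswap]
    · rw [if_neg h1]

-- heap invariant everywhere except below node i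
def pvHeapExcept (l : List String) (i : Nat) : Prop :=
  ∀ j, j < l.length → 0 < j → (j-1)/2 ≠ i → l.getD ((j-1)/2) "" ≤ l.getD j ""

theorem pvSiftDown_heap (fuel : Nat) : ∀ (l : List String) (i : Nat), l.length - i ≤ fuel →
    pvHeapExcept l i →
    (∀ j, j < l.length → 0 < j → (j-1)/2 = i → 0 < i → l.getD ((i-1)/2) "" ≤ l.getD j "") →
    pvHeapLe (pvSiftDown fuel l i) := by
  induction fuel with
  | zero =>
    intro l i hf hx hg
    show pvHeapLe l
    intro j hj hj0
    by_cases hpi : (j-1)/2 = i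
    · omega
    · exact hx j hj hj0 hpi
  | succ fuel ih =>
    intro l i hf hx hg
    rw [pvSiftDown]
    by_cases h1 : 2*i+1 < l.length
    · rw [if_pos h1]
      by_cases hswap : l.getD (pvChild l i) "" < l.getD i ""
      · rw [if_pos hswap]
        have hi : i < l.length := by omega
        set c := pvChild l i with hcdef
        have hcase := pvChild_spec l i
        rw [← hcdef] at hcase
        have hcl : c < l.length := by rcases hcase with ⟨h, h2, _⟩ | ⟨h, _⟩ <;> omega
        have hic : i < c := by rcases hcase with ⟨h, _⟩ | ⟨h, _⟩ <;> omega
        have hmg : ∀ j : Nat, ((l.set i (l.getD c "")).set c (l.getD i "")).getD j ""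
            = if j = c then l.getD i "" else if j = i then l.getD c "" else l.getD j "" := by
          intro j
          rw [pvGetD_set, pvGetD_set]
          simp only [List.length_set]
          by_cases hjc : j = c
          · rw [if_pos ⟨hjc.symm, hcl⟩, if_pos hjc]
          · rw [if_neg (fun h => hjc h.1.symm), if_neg hjc]
            by_cases hji : j = i
            · rw [if_pos ⟨hji.symm, hi⟩, if_pos hji]
            · rw [if_neg (fun h => hji h.1.symm), if_neg hji]
        have hml : ((l.set i (l.getD c "")).set c (l.getD i "")).length = l.length := by
          simp
        apply ih
        · rw [hml]; omega
        · intro j hj hj0 hpne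
          rw [hml] at hj
          rw [hmg, hmg]
          by_cases hpi : (j-1)/2 = i
          · have hj12 : j = 2*i+1 ∨ j = 2*i+2 := by omega
            rw [if_neg (by omega), if_pos hpi]
            by_cases hjc : j = c
            · rw [if_pos hjc]; exact le_of_lt hswap
            · rw [if_neg hjc, if_neg (by omega)]
              rcases hcase with ⟨hc2, hlt2, hlt⟩ | ⟨hc1, hnot⟩
              · have : j = 2*i+1 := by omega
                subst this; rw [hc2]; exact le_of_lt hlt
              · have : j = 2*i+2 := by omega
                subst this; rw [hc1]
                exact not_lt.mp (fun hl2 => hnot ⟨hj, hl2⟩)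
          · rw [if_neg hpne, if_neg hpi]
            by_cases hji : j = i
            · have hcv : c = 2*i+1 ∨ c = 2*i+2 := by
                rcases hcase with ⟨h, _⟩ | ⟨h, _⟩ <;> omega
              rw [if_neg (by omega), if_pos hji]
              have := hg c hcl (by omega) (by omega) (by omega)
              rw [hji]
              exact this
            · by_cases hjc : j = c
              · exfalso; apply hpi; omega
              · rw [if_neg hjc, if_neg hji]
                exact hx j hj hj0 hpi
        · intro j hj hj0 hjc hc0
          rw [hml] at hj
          rw [hmg, hmg]
          have hci : (c-1)/2 = i := by omega
          rw [hci, if_neg (by omega), if_pos rfl, if_neg (by omega), if_neg (by omega)]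
          have := hx j hj hj0 (by omega)
          rw [hjc] at this
          exact this
      · rw [if_neg hswap]
        have hi : i < l.length := by omega
        set c := pvChild l i with hcdef
        have hcase := pvChild_spec l i
        rw [← hcdef] at hcase
        have hcl : c < l.length := by rcases hcase with ⟨h, h2, _⟩ | ⟨h, _⟩ <;> omega
        intro j hj hj0
        by_cases hpi : (j-1)/2 = i
        · rw [hpi]
          have hj12 : j = 2*i+1 ∨ j = 2*i+2 := by omega
          have hic : l.getD i "" ≤ l.getD c "" := not_lt.mp hswap
          by_cases hjc : j = c
          · rw [hjc]; exact hic
          · rcases hcase with ⟨hc2, hlt2, hlt⟩ | ⟨hc1, hnot⟩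
            · have : j = 2*i+1 := by omega
              subst this
              exact le_trans hic (by rw [hc2]; exact le_of_lt hlt)
            · have : j = 2*i+2 := by omega
              subst this
              exact le_trans hic (by rw [hc1]; exact not_lt.mp (fun hl2 => hnot ⟨hj, hl2⟩))
        · exact hx j hj hj0 hpi
    · rw [if_neg h1]
      intro j hj hj0
      by_cases hpi : (j-1)/2 = i
      · omega
      · exact hx j hj hj0 hpi

theorem pvGetD_dropLast (l : List String) (j : Nat) (h : j < l.length - 1) :
    l.dropLast.getD j "" = l.getD j "" := by
  rw [List.getD_eq_getElem _ _ (by simp; omega), List.getD_eq_getElem _ _ (by omega)]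
  exact List.getElem_dropLast _

theorem pvRoot_min (l : List String) (h : pvHeapLe l) :
    ∀ j, j < l.length → l.getD 0 "" ≤ l.getD j "" := by
  intro j
  induction j using Nat.strong_induction_on with
  | _ j ih =>
    intro hj
    rcases Nat.eq_zero_or_pos j with h0 | h0
    · subst h0; exact le_refl _
    · exact le_trans (ih ((j-1)/2) (by omega) (by omega)) (h j hj h0)

theorem pvHeappop_spec {l : List String} {v : String} {l' : List String}
    (hpop : pvHeappop l = some (v, l')) (hh : pvHeapLe l) :
    (v :: l').Perm l ∧ pvHeapLe l' ∧ v = l.getD 0 "" := by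
  unfold pvHeappop at hpop
  cases hl : l.getLast? with
  | none => rw [hl] at hpop; simp at hpop
  | some last =>
    rw [hl] at hpop
    simp only at hpop
    have hne : l ≠ [] := by intro he; subst he; simp at hl
    have hlast : l.getLast hne = last := by
      have := List.getLast?_eq_some_getLast hne
      rw [hl] at this
      exact (Option.some_inj.mp this.symm)
    have hdecomp : l.dropLast ++ [last] = l := by rw [← hlast]; exact List.dropLast_append_getLast hne
    split at hpop
    · next hemp =>
      have hdl : l.dropLast = [] := List.isEmpty_iff.mp hemp
      simp only [Option.some_inj, Prod.mk.injEq] at hpop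
      obtain ⟨rfl, rfl⟩ := hpop
      have hl1 : l = [last] := by rw [← hdecomp, hdl]; rfl
      refine ⟨by rw [hl1], ?_, by rw [hl1]; rfl⟩
      intro j hj hj0
      simp at hj
    · next hemp =>
      simp only [Option.some_inj, Prod.mk.injEq] at hpop
      obtain ⟨rfl, rfl⟩ := hpop
      have hrne : l.dropLast ≠ [] := fun he => hemp (by simp [he])
      have hrlen : 0 < l.dropLast.length := List.length_pos_iff.mpr hrne
      have hlen2 : 2 ≤ l.length := by
        have := List.length_dropLast (xs := l)
        omega
      -- the tail-less list is still a heap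
      have hhr : pvHeapLe l.dropLast := by
        intro j hj hj0
        have hjl : j < l.length - 1 := by
          have := List.length_dropLast (xs := l)
          omega
        rw [pvGetD_dropLast _ _ hjl, pvGetD_dropLast _ _ (by omega)]
        exact hh j (by omega) hj0
      -- last moved to the root: heap everywhere except the root
      have hx : pvHeapExcept (l.dropLast.set 0 last) 0 := by
        intro j hj hj0 hpne
        rw [List.length_set] at hj
        rw [pvGetD_set, pvGetD_set, if_neg (by omega), if_neg (by omega)]
        exact hhr j hj hj0
      have hh' : pvHeapLe (pvSiftDown l.dropLast.length (l.dropLast.set 0 last) 0) :=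
        pvSiftDown_heap _ _ 0 (by simp) hx (fun j _ _ _ h0 => absurd h0 (lt_irrefl 0))
      refine ⟨?_, hh', ?_⟩
      · -- permutation
        obtain ⟨r0, t, hr⟩ : ∃ r0 t, l.dropLast = r0 :: t := by
          cases hq : l.dropLast with
          | nil => exact absurd hq hrne
          | cons a b => exact ⟨a, b, rfl⟩
        have hset : l.dropLast.set 0 last = last :: t := by rw [hr]; rfl
        have hv0 : l.dropLast.getD 0 "" = r0 := by rw [hr]; rfl
        rw [hv0, hset]
        have p1 : (r0 :: pvSiftDown l.dropLast.length (last :: t) 0).Perm (r0 :: (t ++ [last])) :=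
          List.Perm.cons r0 ((pvSiftDown_perm _ _ _).trans
            (List.Perm.symm (List.perm_append_singleton last t)))
        have p2 : r0 :: (t ++ [last]) = l := by
          rw [show r0 :: (t ++ [last]) = (r0 :: t) ++ [last] from rfl, ← hr, hdecomp]
        exact p2 ▸ p1
      · -- popped value is the root
        rw [List.getD_eq_getElem _ _ hrlen, List.getD_eq_getElem _ _ (by omega)]
        exact List.getElem_dropLast _

theorem pvSorted_cons {heap : List String} {v : String} {l' : List String}
    (hh : pvHeapLe heap) (hpop : pvHeappop heap = some (v, l')) :
    PySem.List.sorted heap (fun x => x) false = v :: PySem.List.sorted l' (fun x => x) false := by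
  obtain ⟨hperm, _hh', hv⟩ := pvHeappop_spec hpop hh
  apply PySem.List.sorted_id_eq_of_perm_of_pairwise
  · exact (List.Perm.cons v (PySem.List.sorted_perm l' _ _)).trans hperm
  · rw [List.pairwise_cons]
    constructor
    · intro x hx
      have hx' : x ∈ l' := (PySem.List.mem_sorted l' _ _ x).mp hx
      have hxh : x ∈ heap := hperm.subset (List.mem_cons_of_mem v hx')
      obtain ⟨j, hj, rfl⟩ := List.getElem_of_mem hxh
      rw [hv]
      have := pvRoot_min heap hh j hj
      rwa [List.getD_eq_getElem _ _ hj] at this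
    · have := PySem.List.sorted_pairwise (xs := l') (key := fun x => x)
      simpa using this

theorem pvDrain_eq (fuel : Nat) : ∀ (heap : List String), heap.length ≤ fuel →
    ∀ (vm : PySem.Dict String (List String)) (out : List String), pvHeapLe heap →
    (∀ v ∈ heap, heap.count v ≤ (vm.getD v []).length) →
    pvDrain fuel heap vm out = ((PySem.List.sorted heap (fun x => x) false).foldl pvTake (vm, out)).2 := by
  induction fuel with
  | zero =>
    intro heap hn vm out hh hav
    have hnil : heap = [] := List.eq_nil_of_length_eq_zero (by omega)
    subst hnil
    rfl
  | succ fuel ih =>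
    intro heap hn vm out hh hav
    rw [pvDrain]
    cases hpop : pvHeappop heap with
    | none =>
      have hnil : heap = [] := by
        by_contra hne
        unfold pvHeappop at hpop
        rw [List.getLast?_eq_some_getLast hne] at hpop
        simp only at hpop
        split at hpop <;> simp at hpop
      subst hnil
      rfl
    | some p =>
      obtain ⟨v, l'⟩ := p
      obtain ⟨hperm, hh', hv⟩ := pvHeappop_spec hpop hh
      have hvm : v ∈ heap := hperm.subset List.mem_cons_self
      have hc1 : 0 < heap.count v := List.count_pos_iff.mpr hvm
      have hlen1 : 1 ≤ (vm.getD v []).length := le_trans hc1 (hav v hvm)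
      have hrfl : vm.getD v [] = (vm.get? v).getD [] := rfl
      have hget : vm.get? v = some (vm.getD v []) := by
        cases hq : vm.get? v with
        | none => rw [hq] at hrfl; simp at hrfl; rw [hrfl] at hlen1; simp at hlen1
        | some ids => rw [hrfl, hq]; rfl
      have hids : vm.getD v [] ≠ [] := by
        intro he; rw [he] at hlen1; simp at hlen1
      cases hl2 : (vm.getD v []).getLast? with
      | none => exact absurd (List.getLast?_eq_none_iff.mp hl2) hids
      | some b =>
        simp only [hget, hl2]
        have hlen' : l'.length + 1 = heap.length := by
          have := hperm.length_eq
          simp at this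
          omega
        have hstep : pvTake (vm, out) v = (vm.insert v (vm.getD v []).dropLast, out ++ [b ++ " " ++ v]) := by
          simp [pvTake, hget, hl2]
        rw [pvSorted_cons hh hpop, List.foldl_cons, hstep]
        have hav' : ∀ w ∈ l', l'.count w ≤ ((vm.insert v (vm.getD v []).dropLast).getD w []).length := by
          intro w hw
          have hcnt : (v :: l').count w = heap.count w := hperm.count_eq w
          by_cases hwv : w = v
          · subst hwv
            rw [PySem.Dict.getD_insert_self]
            have h1 : (w :: l').count w = l'.count w + 1 := by simp
            have h2 := hav w hvm
            have h3 : ((vm.getD w []).dropLast).length = (vm.getD w []).length - 1 :=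
              List.length_dropLast
            omega
          · rw [PySem.Dict.getD_insert_of_ne vm _ [] hwv]
            have h1 : (v :: l').count w = l'.count w := by
              rw [List.count_cons]
              simp [Ne.symm hwv]
            have h2 := hav w (hperm.subset (List.mem_cons_of_mem v hw))
            exact le_of_eq_of_le (h1.symm.trans hcnt) h2
        exact ih l' (by omega) (vm.insert v (vm.getD v []).dropLast)
          (out ++ [b ++ " " ++ v]) hh' hav'

theorem pvRegDrain_eq (fuel : Nat) : ∀ (rb out : List String), rb.length ≤ fuel →
    pvRegDrain fuel rb out = out ++ rb.reverse := by
  induction fuel with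
  | zero =>
    intro rb out hn
    have : rb = [] := List.eq_nil_of_length_eq_zero (by omega)
    subst this
    simp [pvRegDrain]
  | succ fuel ih =>
    intro rb out hn
    rw [pvRegDrain]
    cases hl : rb.getLast? with
    | none => simp [List.getLast?_eq_none_iff.mp hl]
    | some x =>
      have hne : rb ≠ [] := by intro he; subst he; simp at hl
      have hx : rb.getLast hne = x := by
        have := List.getLast?_eq_some_getLast hne
        rw [hl] at this
        exact (Option.some_inj.mp this.symm)
      have hlen : rb.dropLast.length ≤ fuel := by
        have h0 : 0 < rb.length := List.length_pos_iff.mpr hne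
        have := List.length_dropLast (xs := rb)
        omega
      calc pvRegDrain fuel rb.dropLast (out ++ [x]) = (out ++ [x]) ++ rb.dropLast.reverse := ih _ _ hlen
        _ = out ++ rb.reverse := by
            conv_rhs => rw [← List.dropLast_append_getLast hne]
            simp [hx]

-- ===== VERDICT (by name: the statement is the Claim_ definition above) =====
theorem merge_boxs_spec : Claim_equal_merge_boxs := by
  intro p vm rb _hdom hpre
  unfold Spec_merge_boxs merge_boxs merge_boxs_alt
  rw [pvRegDrain_eq _ _ _ (le_refl _), pvDrain_eq p.length p (le_refl _) _ _ ((pvIsHeap_iff p).mp hpre.1) hpre.2]
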